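-- pv_equiv track=rewrite | github.com/CSBoyDH/coding | dh-wemda.py | f
-- ===== SOURCE A (Python) =====
-- def f(string,n):
--     l = []
--     for i in range(0,len(string)):
--         if len(set(string[i:i+n]))==1 and i+n<=len(string):
--             if i>0 and i+n<len(string):
--                 if string[i-1]!=string[i] and string[i+n]!=string[i]:
--                     l.append((i+1,i+n,string[i:i+n]))
--             elif i==0 and i+n<len(string):
--                 if string[i+n]!=string[i]:
--                     l.append((i+1,i+n,string[i:i+n]))
--             elif i>0 and i+n==len(string):
--                 if string[i-1]!=string[i]:
--                     l.append((i+1,i+n,string[i:i+n]))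
--             else:
--                 l.append((i + 1, i + n, string[i:i + n]))
--
--     return l
-- ===== SOURCE B (Python) =====
-- def f(string, n):
--     # Single run-length pass: walk the string once, find each maximal run,
--     # emit it when its length is exactly n.
--     l = []
--     i = 0
--     L = len(string)
--     while i < L:
--         j = i + 1
--         while j < L and string[j] == string[i]:
--             j += 1
--         if j - i == n:
--             l.append((i + 1, i + n, string[i:j]))
--         i = j
--     return l
-- ===== Notes on version B (the rewrite author's own statement) =====
-- stated objective: faster
-- what changed: replaced A's per-index window scan (building set(string[i:i+n]) and checking neighbours for every i) by a single run-length pass that finds each maximal run once and emits it when its length is exactly n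
-- outside the precondition, e.g. on f('ab', -1): A returns [(1, -1, 'a')], B returns []
import Mathlib
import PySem

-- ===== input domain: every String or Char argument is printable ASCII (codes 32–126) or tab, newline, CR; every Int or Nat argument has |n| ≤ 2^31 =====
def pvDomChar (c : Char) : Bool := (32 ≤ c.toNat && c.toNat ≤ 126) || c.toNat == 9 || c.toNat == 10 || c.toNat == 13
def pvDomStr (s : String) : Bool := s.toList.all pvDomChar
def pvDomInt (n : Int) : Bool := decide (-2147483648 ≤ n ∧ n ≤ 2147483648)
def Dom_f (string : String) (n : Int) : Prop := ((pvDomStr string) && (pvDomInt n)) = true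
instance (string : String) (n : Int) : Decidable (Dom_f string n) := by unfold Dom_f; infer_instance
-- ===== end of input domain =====

-- B replaces A's per-index window scan by a single run-length pass over the string.


-- ===== PORT A =====
-- one iteration of A's `for i in range(len(string))` loop, branch for branch
-- (`string[i-1]`/`string[i]`/`string[i+n]` are PySem.List.pyGet?; on the admitted inputs
-- (0 ≤ n) every index A actually reads is in range, so no IndexError arises)
def fStep (cs : List Char) (L n : Int) (l : List (Int × Int × String)) (i : Int) :
    List (Int × Int × String) :=
  if (PySem.Set.ofList (PySem.List.slice cs (some i) (some (i + n)))).length = 1 ∧ i + n ≤ L then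
    if i > 0 ∧ i + n < L then
      if PySem.List.pyGet? cs (i - 1) ≠ PySem.List.pyGet? cs i ∧
         PySem.List.pyGet? cs (i + n) ≠ PySem.List.pyGet? cs i then
        l ++ [(i + 1, i + n, String.ofList (PySem.List.slice cs (some i) (some (i + n))))]
      else l
    else if i = 0 ∧ i + n < L then
      if PySem.List.pyGet? cs (i + n) ≠ PySem.List.pyGet? cs i then
        l ++ [(i + 1, i + n, String.ofList (PySem.List.slice cs (some i) (some (i + n))))]
      else l
    else if i > 0 ∧ i + n = L then
      if PySem.List.pyGet? cs (i - 1) ≠ PySem.List.pyGet? cs i then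
        l ++ [(i + 1, i + n, String.ofList (PySem.List.slice cs (some i) (some (i + n))))]
      else l
    else
      l ++ [(i + 1, i + n, String.ofList (PySem.List.slice cs (some i) (some (i + n))))]
  else l

def f (string : String) (n : Int) : List (Int × Int × String) :=
  let cs := string.toList
  let L : Int := PySem.Str.len string
  (PySem.List.pyRange 0 L).foldl (fStep cs L n) []

-- ===== PORT B =====
-- B's outer `while i < L` loop: at position `pos` consume one maximal run and emit it if its
-- length is exactly n; the inner `while j < L and string[j] == string[i]` scan is takeWhile/dropWhile.
def fAltGo (n : Int) (pos : Nat) (cs : List Char) : List (Int × Int × String) :=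
  match cs with
  | [] => []
  | c :: rest =>
      let run := rest.takeWhile (fun d => d == c)
      let k := run.length + 1
      (if (k : Int) = n then
        [((pos : Int) + 1, (pos : Int) + n, String.ofList (c :: run))]
       else []) ++ fAltGo n (pos + k) (rest.dropWhile (fun d => d == c))
  termination_by cs.length
  decreasing_by
    simp only [List.length_cons]
    exact Nat.lt_succ_of_le (List.length_dropWhile_le _ _)

def f_alt (string : String) (n : Int) : List (Int × Int × String) :=
  fAltGo n 0 string.toList

-- ===== PRECONDITION & SPEC =====
-- Pre_ excludes negative n with |n| < len(string) — outside the natural domain of a run length —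
-- where A's Python negative-slice/negative-index wraparound can emit accidental tuples
-- (e.g. f('ab', -1) = [(1, -1, 'a')]) while B's run-length pass returns [].
def Pre_f (string : String) (n : Int) : Prop := 0 ≤ n ∨ PySem.Str.len string ≤ -n
instance (string : String) (n : Int) : Decidable (Pre_f string n) := by unfold Pre_f; infer_instance
def pvWitness_f : String × Int := ("aabba", 2)

def Spec_f (string : String) (n : Int) (out : List (Int × Int × String)) : Prop := out = f_alt string n
instance (string : String) (n : Int) (out : List (Int × Int × String)) : Decidable (Spec_f string n out) := by unfold Spec_f; infer_instance

-- ===== CLAIM (what is proved, stated in full; the proofs are below) =====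
def Claim_equal_f : Prop := ∀ (string : String) (n : Int), Dom_f string n → Pre_f string n → Spec_f string n (f string n)

-- ===== LEMMAS AND PROOFS =====

-- "a maximal run of length exactly m starts at index j": the m characters from j all equal
-- cs[j], the previous character (if any) differs, the next character (if any) differs.
def CondB (cs : List Char) (m j : Nat) : Bool :=
  decide (1 ≤ m ∧ j + m ≤ cs.length ∧ (∀ t < m, cs[j + t]? = cs[j]?) ∧
    (j = 0 ∨ cs[j - 1]? ≠ cs[j]?) ∧ (j + m = cs.length ∨ cs[j + m]? ≠ cs[j]?))

lemma CondB_iff (cs : List Char) (m j : Nat) :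
    CondB cs m j = true ↔
      (1 ≤ m ∧ j + m ≤ cs.length ∧ (∀ t < m, cs[j + t]? = cs[j]?) ∧
       (j = 0 ∨ cs[j - 1]? ≠ cs[j]?) ∧ (j + m = cs.length ∨ cs[j + m]? ≠ cs[j]?)) := by
  unfold CondB
  exact decide_eq_true_iff

-- the triple emitted for a run of length m starting at offset pos + j
def outP (cs : List Char) (m pos j : Nat) : Int × Int × String :=
  ((pos : Int) + j + 1, (pos : Int) + j + m, String.ofList ((cs.drop j).take m))

lemma set_len_one_iff (l : List Char) :
    (PySem.Set.ofList l).length = 1 ↔ ∃ a, l ≠ [] ∧ ∀ x ∈ l, x = a := by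
  constructor
  · intro h
    obtain ⟨a, ha⟩ := List.length_eq_one_iff.mp h
    refine ⟨a, ?_, ?_⟩
    · intro hnil
      simp [hnil, PySem.Set.ofList] at ha
    · intro x hx
      have : x ∈ PySem.Set.ofList l := (PySem.Set.mem_ofList l x).mpr hx
      rw [ha] at this; simpa using this
  · rintro ⟨a, hne, hall⟩
    have hmem : a ∈ PySem.Set.ofList l := by
      rw [PySem.Set.mem_ofList]
      obtain ⟨y, hy⟩ := List.exists_mem_of_ne_nil l hne
      exact hall y hy ▸ hy
    have hsub : ∀ x ∈ PySem.Set.ofList l, x = a := fun x hx =>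
      hall x ((PySem.Set.mem_ofList l x).mp hx)
    have hnd := PySem.Set.nodup_ofList l
    rcases hS : PySem.Set.ofList l with _ | ⟨b, _ | ⟨c, rest⟩⟩
    · rw [hS] at hmem; simp at hmem
    · rfl
    · rw [hS] at hsub hnd
      have hb := hsub b (by simp)
      have hc := hsub c (by simp)
      subst hb; rw [hc] at hnd; simp at hnd

lemma uniform_iff (cs : List Char) (m j : Nat) (hj : j < cs.length) (hm : j + m ≤ cs.length) :
    (∃ a, (cs.drop j).take m ≠ [] ∧ ∀ x ∈ (cs.drop j).take m, x = a) ↔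
      (1 ≤ m ∧ ∀ t < m, cs[j + t]? = cs[j]?) := by
  have hlen : ((cs.drop j).take m).length = m := by
    simp [List.length_take, List.length_drop]; omega
  have hget : ∀ (t : Nat) (ht : t < m), ((cs.drop j).take m)[t]'(by omega) = cs[j + t]'(by omega) := by
    intro t ht
    simp [List.getElem_take, List.getElem_drop]
  constructor
  · rintro ⟨a, hne, hall⟩
    have hm1 : 1 ≤ m := by
      rcases Nat.eq_zero_or_pos m with h | h
      · subst h; simp at hne
      · exact h
    refine ⟨hm1, fun t ht => ?_⟩
    have h1 : cs[j + t]'(by omega) = a := by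
      rw [← hget t ht]; exact hall _ (List.getElem_mem _)
    have h2 : cs[j]'(by omega) = a := by
      have h0 := hget 0 (by omega)
      simp only [Nat.add_zero] at h0
      rw [← h0]; exact hall _ (List.getElem_mem _)
    rw [List.getElem?_eq_getElem (by omega), List.getElem?_eq_getElem (by omega), h1, h2]
  · rintro ⟨hm1, hu⟩
    refine ⟨cs[j]'hj, ?_, ?_⟩
    · intro hnil
      rw [hnil] at hlen; simp at hlen; omega
    · intro x hx
      obtain ⟨t, ht, hxt⟩ := List.mem_iff_getElem.mp hx
      rw [hlen] at ht
      have := hu t ht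
      rw [List.getElem?_eq_getElem (by omega), List.getElem?_eq_getElem (by omega)] at this
      have h3 := Option.some.inj this
      rw [← hxt, hget t ht, h3]

lemma stepA_eq (cs : List Char) (m j : Nat) (l : List (Int × Int × String)) (hj : j < cs.length) :
    fStep cs (cs.length : Int) (m : Int) l (j : Int) =
      if CondB cs m j then l ++ [outP cs m 0 j] else l := by
  unfold fStep
  rw [PySem.List.slice_natCast_add]
  by_cases hle : j + m ≤ cs.length
  · by_cases hset : (PySem.Set.ofList ((cs.drop j).take m)).length = 1
    · obtain ⟨hm1, hu⟩ := (uniform_iff cs m j hj hle).mp ((set_len_one_iff _).mp hset)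
      rw [if_pos ⟨hset, by exact_mod_cast hle⟩]
      have g0 : PySem.List.pyGet? cs (j : Int) = cs[j]? := PySem.List.pyGet?_natCast cs j
      have g2 : PySem.List.pyGet? cs ((j : Int) + (m : Int)) = cs[j + m]? := by
        rw [show ((j : Int) + (m : Int)) = ((j + m : Nat) : Int) by push_cast; ring,
          PySem.List.pyGet?_natCast]
      have hT : ((j : Int) + 1, (j : Int) + (m : Int), String.ofList ((cs.drop j).take m)) =
          outP cs m 0 j := by simp [outP]
      rcases Nat.eq_zero_or_pos j with hj0 | hj0
      · subst hj0
        rw [if_neg (by simp)]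
        rcases lt_or_eq_of_le hle with hR | hR
        · rw [if_pos ⟨by norm_num, by exact_mod_cast hR⟩, g2, g0]
          have hC : CondB cs m 0 = true ↔ ¬ cs[0 + m]? = cs[0]? := by
            rw [CondB_iff]
            constructor
            · rintro ⟨_, _, _, _, hr | hr⟩
              · omega
              · exact hr
            · intro h; exact ⟨hm1, hle, hu, Or.inl rfl, Or.inr h⟩
          by_cases hne : cs[0 + m]? = cs[0]?
          · rw [if_neg (by simpa using hne), if_neg (by rw [hC]; simpa using hne)]
          · rw [if_pos (by simpa using hne), if_pos (hC.mpr hne), hT]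
        · rw [if_neg (by rintro ⟨_, h⟩; push_cast at h; omega), if_neg (by simp), hT]
          rw [if_pos ((CondB_iff cs m 0).mpr ⟨hm1, hle, hu, Or.inl rfl, Or.inl hR⟩)]
      · have g1 : PySem.List.pyGet? cs ((j : Int) - 1) = cs[j - 1]? := by
          rw [show ((j : Int) - 1) = ((j - 1 : Nat) : Int) by omega, PySem.List.pyGet?_natCast]
        have hjpos : (0 : Int) < (j : Int) := by exact_mod_cast hj0
        have hjne : j ≠ 0 := by omega
        rcases lt_or_eq_of_le hle with hR | hR
        · rw [if_pos ⟨hjpos, by exact_mod_cast hR⟩, g1, g2, g0]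
          have hC : CondB cs m j = true ↔ (¬ cs[j - 1]? = cs[j]? ∧ ¬ cs[j + m]? = cs[j]?) := by
            rw [CondB_iff]
            constructor
            · rintro ⟨_, _, _, hl | hl, hr | hr⟩
              · exact absurd hl hjne
              · exact absurd hl hjne
              · exact absurd hr (by omega)
              · exact ⟨hl, hr⟩
            · rintro ⟨h1, h2⟩; exact ⟨hm1, hle, hu, Or.inr h1, Or.inr h2⟩
          by_cases hb : ¬ cs[j - 1]? = cs[j]? ∧ ¬ cs[j + m]? = cs[j]?
          · rw [if_pos hb, if_pos (hC.mpr hb), hT]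
          · rw [if_neg hb, if_neg (by rw [hC]; exact hb)]
        · rw [if_neg (by rintro ⟨_, h⟩; omega),
            if_neg (by rintro ⟨h, _⟩; exact absurd h (by exact_mod_cast hjne)),
            if_pos ⟨hjpos, by exact_mod_cast hR⟩, g1, g0]
          have hC : CondB cs m j = true ↔ ¬ cs[j - 1]? = cs[j]? := by
            rw [CondB_iff]
            constructor
            · rintro ⟨_, _, _, hl | hl, _⟩
              · exact absurd hl hjne
              · exact hl
            · intro h; exact ⟨hm1, hle, hu, Or.inr h, Or.inl hR⟩
          by_cases hne : cs[j - 1]? = cs[j]?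
          · rw [if_neg (by simpa using hne), if_neg (by rw [hC]; simpa using hne)]
          · rw [if_pos (by simpa using hne), if_pos (hC.mpr hne), hT]
    · rw [if_neg (by rintro ⟨h, _⟩; exact hset h), if_neg]
      intro hcb
      obtain ⟨h1, h2, h3, _⟩ := (CondB_iff cs m j).mp hcb
      exact hset ((set_len_one_iff _).mpr ((uniform_iff cs m j hj hle).mpr ⟨h1, h3⟩))
  · rw [if_neg (by rintro ⟨_, h⟩; exact hle (by exact_mod_cast h)), if_neg]
    intro hcb
    obtain ⟨_, h, _⟩ := (CondB_iff cs m j).mp hcb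
    exact hle h

lemma idxF (c : Char) (run t : List Char) (hall : ∀ x ∈ run, x = c) :
    ∀ i < run.length + 1, ((c :: run) ++ t)[i]? = some c := by
  intro i hi
  rw [List.getElem?_append_left (by simp; omega)]
  cases i with
  | zero => simp
  | succ i' =>
    have hi' : i' < run.length := by omega
    simp only [List.getElem?_cons_succ]
    rw [List.getElem?_eq_getElem hi']
    exact congrArg some (hall _ (List.getElem_mem _))

lemma idxT (c : Char) (run t : List Char) (i : Nat) :
    ((c :: run) ++ t)[run.length + 1 + i]? = t[i]? := by
  rw [List.getElem?_append_right (by simp)]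
  congr 1
  simp

lemma lenF (c : Char) (run t : List Char) :
    ((c :: run) ++ t).length = (run.length + 1) + t.length := by
  simp; omega

lemma cond_first (c : Char) (run t : List Char) (hall : ∀ x ∈ run, x = c)
    (hne : ∀ (h : t ≠ []), t.head h ≠ c) (m j : Nat) (hj : j < run.length + 1) :
    CondB ((c :: run) ++ t) m j = true ↔ (j = 0 ∧ m = run.length + 1) := by
  have hL := lenF c run t
  set k := run.length + 1 with hk
  rw [CondB_iff]
  constructor
  · rintro ⟨hm1, hlen, hu, hleft, hright⟩
    rw [hL] at hlen
    have hj0 : j = 0 := by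
      rcases hleft with h0 | hne'
      · exact h0
      · by_contra h
        exact hne' (by rw [idxF c run t hall (j - 1) (by omega), idxF c run t hall j hj])
    subst hj0
    refine ⟨rfl, ?_⟩
    by_contra hmk
    rcases Nat.lt_or_ge m k with hlt | hge
    · rcases hright with he | hne'
      · rw [hL] at he; omega
      · exact hne' (by rw [idxF c run t hall (0 + m) (by omega), idxF c run t hall 0 (by omega)])
    · have hmk' : k < m := by omega
      have ht : t ≠ [] := by
        intro h
        rw [h] at hlen; simp at hlen; omega
      have hk2 := hu k (by omega)
      rw [idxF c run t hall 0 (by omega)] at hk2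
      rw [Nat.zero_add] at hk2
      rw [show k = k + 0 from rfl, idxT c run t 0] at hk2
      rw [List.getElem?_eq_getElem (by simp [List.length_pos_iff]; exact ht)] at hk2
      have h5 := hne ht
      rw [← List.head_eq_getElem] at hk2
      · exact h5 (Option.some.inj hk2)
      · exact ht
  · rintro ⟨rfl, rfl⟩
    refine ⟨by omega, by rw [hL]; omega, ?_, Or.inl rfl, ?_⟩
    · intro t' ht'
      rw [idxF c run t hall (0 + t') (by omega), idxF c run t hall 0 (by omega)]
    · rcases eq_or_ne t [] with ht | ht
      · left; rw [hL, ht]; simp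
      · right
        rw [idxF c run t hall 0 (by omega)]
        rw [Nat.zero_add, show k = k + 0 from rfl, idxT c run t 0]
        rw [List.getElem?_eq_getElem (by simp [List.length_pos_iff]; exact ht)]
        intro hcontra
        have h6 : t.head ht = c := by
          rw [List.head_eq_getElem]
          exact Option.some.inj hcontra
        exact hne ht h6

lemma cond_shift (c : Char) (run t : List Char) (hall : ∀ x ∈ run, x = c)
    (hne : ∀ (h : t ≠ []), t.head h ≠ c) (m j : Nat) :
    CondB ((c :: run) ++ t) m ((run.length + 1) + j) = CondB t m j := by
  have hL := lenF c run t
  set k := run.length + 1 with hk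
  rw [Bool.eq_iff_iff, CondB_iff, CondB_iff, hL]
  have e1 : ∀ i, ((c :: run) ++ t)[k + i]? = t[i]? := idxT c run t
  constructor
  · rintro ⟨hm1, hlen, hu, hleft, hright⟩
    refine ⟨hm1, by omega, ?_, ?_, ?_⟩
    · intro t' ht'
      have := hu t' ht'
      rw [show k + j + t' = k + (j + t') from by omega, e1, e1] at this
      exact this
    · rcases Nat.eq_zero_or_pos j with hj0 | hj0
      · exact Or.inl hj0
      · rcases hleft with h0 | hne'
        · omega
        · right
          rw [show k + j - 1 = k + (j - 1) from by omega, e1, e1] at hne'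
          exact hne'
    · rcases hright with he | hne'
      · exact Or.inl (by omega)
      · right
        rw [show k + j + m = k + (j + m) from by omega, e1, e1] at hne'
        exact hne'
  · rintro ⟨hm1, hlen, hu, hleft, hright⟩
    refine ⟨hm1, by omega, ?_, ?_, ?_⟩
    · intro t' ht'
      rw [show k + j + t' = k + (j + t') from by omega, e1, e1]
      exact hu t' ht'
    · right
      rcases Nat.eq_zero_or_pos j with hj0 | hj0
      · subst hj0
        rw [show k + 0 - 1 = k - 1 from by omega, idxF c run t hall (k - 1) (by omega),
          show k + 0 = k + 0 from rfl, e1]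
        rcases eq_or_ne t [] with ht | ht
        · rw [ht]; simp
        · rw [List.getElem?_eq_getElem (by simp [List.length_pos_iff]; exact ht)]
          intro hcontra
          have h6 : t.head ht = c := by
            rw [List.head_eq_getElem]
            exact (Option.some.inj hcontra).symm
          exact hne ht h6
      · rcases hleft with h0 | hne'
        · omega
        · rw [show k + j - 1 = k + (j - 1) from by omega, e1, e1]
          exact hne'
    · rcases hright with he | hne'
      · exact Or.inl (by omega)
      · right
        rw [show k + j + m = k + (j + m) from by omega, e1, e1]
        exact hne'

lemma go_eq_runs_aux (m : Nat) (N : Nat) : ∀ (cs : List Char) (pos : Nat), cs.length ≤ N →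
    fAltGo (m : Int) pos cs =
      ((List.range cs.length).filter (fun j => CondB cs m j)).map (outP cs m pos) := by
  induction N with
  | zero =>
    intro cs pos h
    have hnil : cs = [] := List.eq_nil_of_length_eq_zero (by omega)
    subst hnil
    simp [fAltGo]
  | succ N ih =>
    intro cs pos h
    match cs with
    | [] => simp [fAltGo]
    | c :: rest =>
      rw [fAltGo]
      set run := rest.takeWhile (fun d => d == c) with hrun
      set t := rest.dropWhile (fun d => d == c) with ht
      set k := run.length + 1 with hk
      have hall : ∀ x ∈ run, x = c := by
        intro x hx
        have := List.mem_takeWhile_imp hx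
        simpa using this
      have hneh : ∀ (hne : t ≠ []), t.head hne ≠ c := by
        intro hne
        have := List.head_dropWhile_not (fun d => d == c) (l := rest) hne
        simpa using this
      have hsplit : rest = run ++ t := (List.takeWhile_append_dropWhile).symm
      have hcs : c :: rest = (c :: run) ++ t := by rw [List.cons_append, hsplit]
      rw [hcs, lenF c run t, List.range_add, List.filter_append, List.map_append]
      congr 1
      · -- the first maximal run: emitted exactly when its length k equals m, at index 0
        have hf1 : (List.range k).filter (fun j => CondB ((c :: run) ++ t) m j) =
            if m = k then [0] else [] := by
          rw [List.filter_congr (q := fun j => decide (j = 0 ∧ m = k)) (fun j hj =>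
            Bool.eq_iff_iff.mpr (by
              rw [decide_eq_true_iff]
              exact cond_first c run t hall hneh m j (List.mem_range.mp hj)))]
          by_cases hmk : m = k
          · rw [if_pos hmk]
            rw [hk, List.range_succ_eq_map]
            have hd : (decide (m = run.length + 1)) = true := by
              rw [decide_eq_true_eq, hmk, hk]
            simp [List.filter_map, Function.comp, hd]
          · rw [if_neg hmk]
            apply List.filter_eq_nil_iff.mpr
            intro j hj
            simp [hmk]
        rw [hf1]
        by_cases hmk : m = k
        · rw [if_pos hmk, if_pos (by exact_mod_cast hmk.symm)]
          simp only [List.map_cons, List.map_nil]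
          congr 1
          unfold outP
          have htake : (((c :: run) ++ t).drop 0).take m = c :: run := by
            rw [List.drop_zero, hmk, show k = (c :: run).length from by simp [hk], List.take_left]
          rw [htake]
          simp
        · rw [if_neg hmk, if_neg (by intro hh; exact hmk (by exact_mod_cast hh.symm))]
          simp
      · -- the rest of the string, shifted by the first run's length
        have hlt : t.length ≤ N := by
          have h1 : t.length ≤ rest.length := by rw [ht]; exact List.length_dropWhile_le _ _
          simp only [List.length_cons] at h
          omega
        rw [ih t (pos + k) hlt, List.filter_map, List.map_map]
        simp only [Function.comp_def]
        rw [List.filter_congr (q := fun j => CondB t m j) (fun j hj =>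
          cond_shift c run t hall hneh m j)]
        apply List.map_congr_left
        intro j hj
        unfold outP
        have hdrop : ((c :: run) ++ t).drop (run.length + 1 + j) = t.drop j := by
          rw [List.drop_append]
          rw [List.drop_eq_nil_of_le (by simp only [List.length_cons]; omega)]
          simp
        rw [hdrop]
        congr 1
        · push_cast; omega
        · congr 1
          push_cast; omega

lemma go_eq_runs (m : Nat) (cs : List Char) (pos : Nat) :
    fAltGo (m : Int) pos cs =
      ((List.range cs.length).filter (fun j => CondB cs m j)).map (outP cs m pos) :=
  go_eq_runs_aux m cs.length cs pos le_rfl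

lemma f_eq_runs (s : String) (m : Nat) :
    f s (m : Int) =
      ((List.range s.toList.length).filter (fun j => CondB s.toList m j)).map
        (outP s.toList m 0) := by
  unfold f
  simp only [PySem.Str.len_eq, PySem.List.pyRange_zero_nat, List.foldl_map]
  rw [PySem.List.foldl_congr_mem _ _
    (fun (l : List (Int × Int × String)) j =>
      if CondB s.toList m j = true then l ++ [outP s.toList m 0 j] else l) []
    (fun acc x hx => stepA_eq s.toList m x acc (List.mem_range.mp hx))]
  rw [PySem.List.foldl_append_if (fun j => CondB s.toList m j) (outP s.toList m 0)]
  simp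

-- on negative n with |n| ≥ len, every slice A looks at is empty, so A appends nothing
lemma slice_neg_empty (cs : List Char) (n i : Int) (hn : n < 0)
    (hL : (cs.length : Int) ≤ -n) (hi : 0 ≤ i) :
    PySem.List.slice cs (some i) (some (i + n)) = [] := by
  simp only [PySem.List.slice, PySem.List.clampIdx]
  split_ifs <;> (rw [Nat.sub_eq_zero_of_le (by omega), List.take_zero])

lemma stepA_neg (cs : List Char) (n i : Int) (l : List (Int × Int × String)) (hn : n < 0)
    (hL : (cs.length : Int) ≤ -n) (hi : 0 ≤ i) :
    fStep cs (cs.length : Int) n l i = l := by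
  unfold fStep
  rw [if_neg]
  rintro ⟨h, _⟩
  rw [slice_neg_empty cs n i hn hL hi] at h
  exact absurd h (by decide)

lemma f_neg (s : String) (n : Int) (hn : n < 0) (hL : (s.toList.length : Int) ≤ -n) :
    f s n = [] := by
  unfold f
  simp only [PySem.Str.len_eq, PySem.List.pyRange_zero_nat, List.foldl_map]
  rw [PySem.List.foldl_congr_mem _ _ (fun (l : List (Int × Int × String)) (_ : Nat) => l) []
    (fun acc x _ => stepA_neg s.toList n x acc hn hL (by positivity))]
  exact List.foldl_fixed _

-- B emits a run only when its (positive) length equals n, so for negative n it emits nothing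
lemma fAltGo_neg_aux (n : Int) (hn : n < 0) (N : Nat) :
    ∀ (cs : List Char) (pos : Nat), cs.length ≤ N → fAltGo n pos cs = [] := by
  induction N with
  | zero =>
    intro cs pos h
    have hnil : cs = [] := List.eq_nil_of_length_eq_zero (by omega)
    subst hnil
    simp [fAltGo]
  | succ N ih =>
    intro cs pos h
    match cs with
    | [] => simp [fAltGo]
    | c :: rest =>
      rw [fAltGo]
      rw [if_neg (by intro hh; omega)]
      rw [List.nil_append]
      apply ih
      have h1 := List.length_dropWhile_le (fun d => d == c) rest
      simp only [List.length_cons] at h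
      omega

-- ===== VERDICT (by name: the statement is the Claim_ definition above) =====
theorem f_spec : Claim_equal_f := by
  intro s n _ hpre
  rcases le_or_gt 0 n with hn | hn
  · obtain ⟨m, rfl⟩ := Int.eq_ofNat_of_zero_le hn
    unfold Spec_f f_alt
    rw [f_eq_runs, go_eq_runs]
  · rcases hpre with h | h
    · omega
    · unfold Spec_f f_alt
      rw [PySem.Str.len_eq] at h
      rw [f_neg s n hn h, fAltGo_neg_aux n hn s.toList.length s.toList 0 le_rfl]
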